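-- pv_equiv track=rewrite | github.com/gsusI/vota-con-la-chola | scripts/export_political_positions_snapshot.py | review_status_summary
-- ===== SOURCE A (Python) =====
-- from typing import Any
--
-- def safe_text(value: Any) -> str:
--     return str(value or "").strip()
--
-- def review_status_summary(review_lookup: dict[tuple[str, str], dict[str, Any]], evidence: list[dict[str, Any]]) -> dict[str, int]:
--     pending = resolved = ignored = 0
--     for item in evidence:
--         key = (safe_text(item["source_id"]), safe_text(item["source_record_pk"]))
--         rev = review_lookup.get(key)
--         if not rev:
--             continue
--         status = rev["status"]
--         if status == "pending":
--             pending += 1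
--         elif status == "resolved":
--             resolved += 1
--         elif status == "ignored":
--             ignored += 1
--     return {
--         "pending": pending,
--         "resolved": resolved,
--         "ignored": ignored,
--     }
-- ===== SOURCE B (Python) =====
-- from typing import Any
--
-- def safe_text(value: Any) -> str:
--     return str(value or "").strip()
--
-- def review_status_summary(review_lookup: dict[tuple[str, str], dict[str, Any]], evidence: list[dict[str, Any]]) -> dict[str, int]:
--     # Stage 1: count evidence multiplicity per key.
--     key_counts: dict[tuple[str, str], int] = {}
--     for item in evidence:
--         key = (safe_text(item["source_id"]), safe_text(item["source_record_pk"]))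
--         key_counts[key] = key_counts.get(key, 0) + 1
--     # Stage 2: walk the review table once, adding each matched key's multiplicity.
--     summary = {"pending": 0, "resolved": 0, "ignored": 0}
--     for key, rev in review_lookup.items():
--         if not rev:
--             continue
--         n = key_counts.get(key, 0)
--         if not n:
--             continue
--         status = rev["status"]
--         if status in summary:
--             summary[status] += n
--     return summary
-- ===== Notes on version B (the rewrite author's own statement) =====
-- stated objective: alternative
-- what changed: Inverts the traversal: instead of one pass over evidence dispatching each matched status into three accumulators, B counts evidence multiplicity per key in a first pass and then walks the review table once, adding each matched key's multiplicity to its status tally.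
import Mathlib
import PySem

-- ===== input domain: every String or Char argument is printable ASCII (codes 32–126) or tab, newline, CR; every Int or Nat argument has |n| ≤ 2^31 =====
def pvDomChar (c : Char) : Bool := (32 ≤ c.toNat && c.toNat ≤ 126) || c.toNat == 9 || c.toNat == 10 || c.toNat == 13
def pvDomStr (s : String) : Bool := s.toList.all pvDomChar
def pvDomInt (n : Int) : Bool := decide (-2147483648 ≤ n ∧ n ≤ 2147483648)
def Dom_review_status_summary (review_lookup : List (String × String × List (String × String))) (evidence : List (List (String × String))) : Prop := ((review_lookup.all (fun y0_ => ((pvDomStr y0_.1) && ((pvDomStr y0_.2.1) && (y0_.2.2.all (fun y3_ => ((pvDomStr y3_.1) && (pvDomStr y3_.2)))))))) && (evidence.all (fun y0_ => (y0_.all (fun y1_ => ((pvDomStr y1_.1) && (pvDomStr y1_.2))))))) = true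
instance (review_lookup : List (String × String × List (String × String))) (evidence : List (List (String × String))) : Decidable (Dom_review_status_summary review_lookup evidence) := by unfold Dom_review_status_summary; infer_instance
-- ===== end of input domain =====

-- B inverts the traversal: A makes one pass over evidence dispatching each matched status into
-- three accumulators; B counts evidence multiplicity per key, then walks the review table once,
-- adding each matched key's multiplicity to its status entry (objective: alternative).

-- ===== PORT A =====
-- shared module helper: safe_text(value) = str(value or "").strip() on a string argument
def pvSafeText (s : String) : String := PySem.Str.strip s

-- the Python review_lookup dict, rebuilt from its items (duplicate keys overwrite, as dict(...))
def pvLookup (review_lookup : List (String × String × List (String × String))) :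
    PySem.Dict (String × String) (List (String × String)) :=
  PySem.Dict.ofList (review_lookup.map (fun e => ((e.1, e.2.1), e.2.2)))

-- key = (safe_text(item["source_id"]), safe_text(item["source_record_pk"]));
-- missing keys (Python KeyError) are excluded by Pre_, getD "" is never reached there
def pvItemKey (item : List (String × String)) : String × String :=
  let d := PySem.Dict.ofList item
  (pvSafeText ((d.get? "source_id").getD ""), pvSafeText ((d.get? "source_record_pk").getD ""))

-- rev["status"]; a missing "status" (Python KeyError) is excluded by Pre_
def pvStatus (rev : List (String × String)) : String :=
  ((PySem.Dict.ofList rev).get? "status").getD ""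

def pvStepA (d : PySem.Dict (String × String) (List (String × String)))
    (acc : Int × Int × Int) (item : List (String × String)) : Int × Int × Int :=
  match d.get? (pvItemKey item) with
  | none => acc            -- review_lookup.get(key) is None
  | some rev =>
    if rev.isEmpty then acc   -- `if not rev: continue` (empty review dict)
    else
      let status := pvStatus rev
      if status = "pending" then (acc.1 + 1, acc.2.1, acc.2.2)
      else if status = "resolved" then (acc.1, acc.2.1 + 1, acc.2.2)
      else if status = "ignored" then (acc.1, acc.2.1, acc.2.2 + 1)
      else acc

def review_status_summary (review_lookup : List (String × String × List (String × String))) (evidence : List (List (String × String))) : List (String × Int) :=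
  let d := pvLookup review_lookup
  let acc := evidence.foldl (pvStepA d) (0, 0, 0)
  [("pending", acc.1), ("resolved", acc.2.1), ("ignored", acc.2.2)]

-- ===== PORT B =====
-- stage 1: key_counts[key] = key_counts.get(key, 0) + 1 over evidence
def pvKeyCounts (evidence : List (List (String × String))) : PySem.Dict (String × String) Int :=
  evidence.foldl (fun d item => d.insert (pvItemKey item) (d.getD (pvItemKey item) 0 + 1))
    PySem.Dict.empty

-- stage 2 loop body, over review_lookup.items()
def pvStepB (kc : PySem.Dict (String × String) Int)
    (s : PySem.Dict String Int) (e : (String × String) × List (String × String)) :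
    PySem.Dict String Int :=
  if e.2.isEmpty then s                 -- `if not rev: continue`
  else
    let n := kc.getD e.1 0
    if n = 0 then s                     -- `if not n: continue`
    else
      let status := pvStatus e.2
      if s.contains status then s.insert status (s.getD status 0 + n) else s

def review_status_summary_alt (review_lookup : List (String × String × List (String × String))) (evidence : List (List (String × String))) : List (String × Int) :=
  let kc := pvKeyCounts evidence
  let s0 : PySem.Dict String Int := PySem.Dict.ofList [("pending", 0), ("resolved", 0), ("ignored", 0)]
  ((pvLookup review_lookup).items.foldl (pvStepB kc) s0).items

-- ===== PRECONDITION & SPEC =====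
-- Pre_ excludes exactly the inputs on which A raises KeyError: an evidence item lacking the
-- "source_id" or "source_record_pk" key, or one whose matched review record is non-empty but
-- lacks the "status" key.
def Pre_review_status_summary (review_lookup : List (String × String × List (String × String))) (evidence : List (List (String × String))) : Prop :=
  ∀ item ∈ evidence,
    "source_id" ∈ item.map Prod.fst ∧ "source_record_pk" ∈ item.map Prod.fst ∧
    (((pvLookup review_lookup).get? (pvItemKey item)).all
      (fun rev => rev.isEmpty || (rev.map Prod.fst).contains "status")) = true
instance (review_lookup : List (String × String × List (String × String))) (evidence : List (List (String × String))) : Decidable (Pre_review_status_summary review_lookup evidence) := by unfold Pre_review_status_summary; infer_instance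

def pvWitness_review_status_summary : (List (String × String × List (String × String))) × (List (List (String × String))) :=
  ([("a", "b", [("status", "pending")])], [[("source_id", "a"), ("source_record_pk", "b")]])

def Spec_review_status_summary (review_lookup : List (String × String × List (String × String))) (evidence : List (List (String × String))) (out : List (String × Int)) : Prop := out = review_status_summary_alt review_lookup evidence
instance (review_lookup : List (String × String × List (String × String))) (evidence : List (List (String × String))) (out : List (String × Int)) : Decidable (Spec_review_status_summary review_lookup evidence out) := by unfold Spec_review_status_summary; infer_instance

-- ===== CLAIM (what is proved, stated in full; the proofs are below) =====
def Claim_equal_review_status_summary : Prop := ∀ (review_lookup : List (String × String × List (String × String))) (evidence : List (List (String × String))), Dom_review_status_summary review_lookup evidence → Pre_review_status_summary review_lookup evidence → Spec_review_status_summary review_lookup evidence (review_status_summary review_lookup evidence)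

-- ===== LEMMAS AND PROOFS =====

-- the match/status test both programs decide per matched key, as a Bool on the key
def pvCond (d : PySem.Dict (String × String) (List (String × String))) (st : String)
    (k : String × String) : Bool :=
  match d.get? k with
  | none => false
  | some rev => !rev.isEmpty && (pvStatus rev == st)

-- the per-status total B accumulates from a list of review items
def pvSumB (kc : PySem.Dict (String × String) Int)
    (L : List ((String × String) × List (String × String))) (st : String) : Int :=
  ((L.filter (fun e => !e.2.isEmpty && (pvStatus e.2 == st))).map (fun e => kc.getD e.1 0)).sum

-- A's fold = three countP's over the evidence keys
lemma foldA_eq (d : PySem.Dict (String × String) (List (String × String)))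
    (ev : List (List (String × String))) : ∀ (a : Int × Int × Int),
    ev.foldl (pvStepA d) a =
      (a.1 + ((ev.map pvItemKey).countP (pvCond d "pending") : Int),
       a.2.1 + ((ev.map pvItemKey).countP (pvCond d "resolved") : Int),
       a.2.2 + ((ev.map pvItemKey).countP (pvCond d "ignored") : Int)) := by
  induction ev with
  | nil => intro a; simp
  | cons item rest ih =>
    intro a
    simp only [List.foldl_cons, List.map_cons, List.countP_cons, ih]
    cases hg : d.get? (pvItemKey item) with
    | none => simp [pvStepA, pvCond, hg]
    | some rev =>
      simp only [pvStepA, pvCond, hg]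
      by_cases he : rev.isEmpty
      · simp [he]
      · by_cases h1 : pvStatus rev = "pending"
        · simp [he, h1]; ring
        · by_cases h2 : pvStatus rev = "resolved"
          · simp [he, h2]; ring
          · by_cases h3 : pvStatus rev = "ignored"
            · simp [he, h3]; ring
            · simp [he, h1, h2, h3]

-- stage 1 of B is the multiset of evidence keys
lemma keyCounts_getD (ev : List (List (String × String))) (k : String × String) :
    (pvKeyCounts ev).getD k 0 = ((ev.map pvItemKey).count k : Int) := by
  have h : pvKeyCounts ev =
      (ev.map pvItemKey).foldl (fun d x => d.insert x (d.getD x 0 + 1)) PySem.Dict.empty := by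
    simp [pvKeyCounts, List.foldl_map]
  rw [h, PySem.Dict.getD_foldl_insert_add_one]
  simp

-- countP through a pointwise update at a key where the old predicate is false
lemma countP_update (ks : List (String × String)) (k0 : String × String) (c0 : Bool)
    (f : String × String → Bool) (hf : f k0 = false) :
    (ks.countP (fun k => if k0 = k then c0 else f k) : Int) =
      (if c0 then (ks.count k0 : Int) else 0) + (ks.countP f : Int) := by
  induction ks with
  | nil => simp
  | cons x t ih =>
    simp only [List.countP_cons, List.count_cons]
    push_cast
    rw [ih]
    by_cases hx : k0 = x
    · subst hx
      simp [hf]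
      split_ifs <;> simp_all <;> omega
    · have hbx : (x == k0) = false := by simp [Ne.symm hx]
      simp only [if_neg hx, hbx, Bool.false_eq_true, if_false, add_zero]
      split_ifs <;> omega

-- B's per-status total over the review items = A's countP over the evidence keys
lemma sumB_eq_countP (L : List ((String × String) × List (String × String)))
    (hnd : (L.map Prod.fst).Nodup) (kc : PySem.Dict (String × String) Int)
    (ks : List (String × String)) (hkc : ∀ k, kc.getD k 0 = (ks.count k : Int)) (st : String) :
    pvSumB kc L st = (ks.countP (pvCond (PySem.Dict.mk L) st) : Int) := by
  induction L with
  | nil =>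
    have h0 : ks.countP (pvCond (PySem.Dict.mk ([] : List ((String × String) × List (String × String)))) st) = 0 :=
      List.countP_eq_zero.mpr (fun k _ => by simp [pvCond, PySem.Dict.get?])
    simp [pvSumB, h0]
  | cons e rest ih =>
    obtain ⟨k0, rev0⟩ := e
    simp only [List.map_cons, List.nodup_cons] at hnd
    have hrest := ih hnd.2
    have hnone : (PySem.Dict.mk rest).get? k0 = none := by
      rw [PySem.Dict.get?_eq_none_iff_not_mem_keys]
      simpa [PySem.Dict.keys_mk] using hnd.1
    have hcond : ∀ k, pvCond (PySem.Dict.mk ((k0, rev0) :: rest)) st k =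
        (if k0 = k then (!rev0.isEmpty && (pvStatus rev0 == st)) else pvCond (PySem.Dict.mk rest) st k) := by
      intro k
      simp only [pvCond, PySem.Dict.get?_mk_cons, beq_iff_eq]
      by_cases h : k0 = k <;> simp [h]
    have hf0 : pvCond (PySem.Dict.mk rest) st k0 = false := by
      simp [pvCond, hnone]
    have hcc : ks.countP (pvCond (PySem.Dict.mk ((k0, rev0) :: rest)) st) =
        ks.countP (fun k => if k0 = k then (!rev0.isEmpty && (pvStatus rev0 == st)) else pvCond (PySem.Dict.mk rest) st k) :=
      List.countP_congr (fun k _ => by rw [hcond k])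
    rw [hcc, countP_update ks k0 _ _ hf0, ← hrest]
    by_cases he : rev0.isEmpty
    · simp [pvSumB, he]
    · by_cases hs : pvStatus rev0 = st
      · simp [pvSumB, he, hs, hkc]
      · simp [pvSumB, he, hs]

-- stage 2 of B: the fold over the review items adds the three totals to the literal summary dict
lemma foldB_items (kc : PySem.Dict (String × String) Int)
    (L : List ((String × String) × List (String × String))) : ∀ (p r i : Int),
    (L.foldl (pvStepB kc) (PySem.Dict.mk [("pending", p), ("resolved", r), ("ignored", i)])).items
      = [("pending", p + pvSumB kc L "pending"), ("resolved", r + pvSumB kc L "resolved"),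
         ("ignored", i + pvSumB kc L "ignored")] := by
  induction L with
  | nil => intro p r i; simp [pvSumB]
  | cons e rest ih =>
    intro p r i
    simp only [List.foldl_cons]
    have hsum : ∀ st, pvSumB kc (e :: rest) st =
        (if (!e.2.isEmpty && (pvStatus e.2 == st)) then kc.getD e.1 0 else 0) + pvSumB kc rest st := by
      intro st
      by_cases he : e.2.isEmpty <;> by_cases hs : pvStatus e.2 = st <;>
        simp [pvSumB, he, hs]
    by_cases he : e.2.isEmpty
    · simp only [pvStepB, he, if_true, ih, hsum, Bool.not_true, Bool.false_and,
        Bool.false_eq_true, if_false, zero_add]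
    · by_cases hn : kc.getD e.1 0 = 0
      · simp only [pvStepB, he, Bool.false_eq_true, if_false, hn, if_true, ih, hsum]
        simp
      · by_cases h1 : pvStatus e.2 = "pending"
        · have : pvStepB kc (PySem.Dict.mk [("pending", p), ("resolved", r), ("ignored", i)]) e
            = PySem.Dict.mk [("pending", p + kc.getD e.1 0), ("resolved", r), ("ignored", i)] := by
            simp [pvStepB, he, h1, PySem.Dict.contains, PySem.Dict.insert, PySem.Dict.getD,
              PySem.Dict.get?]
          rw [this, ih, hsum "pending", hsum "resolved", hsum "ignored"]
          simp [he, h1]; ring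
        · by_cases h2 : pvStatus e.2 = "resolved"
          · have : pvStepB kc (PySem.Dict.mk [("pending", p), ("resolved", r), ("ignored", i)]) e
              = PySem.Dict.mk [("pending", p), ("resolved", r + kc.getD e.1 0), ("ignored", i)] := by
              simp [pvStepB, he, h2, PySem.Dict.contains, PySem.Dict.insert, PySem.Dict.getD,
                PySem.Dict.get?]
            rw [this, ih, hsum "pending", hsum "resolved", hsum "ignored"]
            simp [he, h2]; ring
          · by_cases h3 : pvStatus e.2 = "ignored"
            · have : pvStepB kc (PySem.Dict.mk [("pending", p), ("resolved", r), ("ignored", i)]) e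
                = PySem.Dict.mk [("pending", p), ("resolved", r), ("ignored", i + kc.getD e.1 0)] := by
                simp [pvStepB, he, h3, PySem.Dict.contains, PySem.Dict.insert, PySem.Dict.getD,
                  PySem.Dict.get?]
              rw [this, ih, hsum "pending", hsum "resolved", hsum "ignored"]
              simp [he, h3]; ring
            · have : pvStepB kc (PySem.Dict.mk [("pending", p), ("resolved", r), ("ignored", i)]) e
                = PySem.Dict.mk [("pending", p), ("resolved", r), ("ignored", i)] := by
                simp only [pvStepB, he, Bool.false_eq_true, if_false, hn,
                  PySem.Dict.contains, List.any_cons, List.any_nil, Bool.or_false,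
                  Bool.or_eq_true, beq_iff_eq]
                rw [if_neg]
                rintro (h | h | h)
                exacts [absurd h.symm h1, absurd h.symm h2, absurd h.symm h3]
              rw [this, ih, hsum "pending", hsum "resolved", hsum "ignored"]
              simp [he, h1, h2, h3]

-- ===== VERDICT (by name: the statement is the Claim_ definition above) =====
theorem review_status_summary_spec : Claim_equal_review_status_summary := by
  intro rl ev _ _
  unfold Spec_review_status_summary review_status_summary review_status_summary_alt
  dsimp only
  have hs0 : (PySem.Dict.ofList [("pending", (0:Int)), ("resolved", 0), ("ignored", 0)])
      = PySem.Dict.mk [("pending", 0), ("resolved", 0), ("ignored", 0)] := by decide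
  have hnd : ((pvLookup rl).items.map Prod.fst).Nodup := by
    simpa [PySem.Dict.keys] using PySem.Dict.nodup_keys_ofList (rl.map (fun e => ((e.1, e.2.1), e.2.2)))
  have hmk : PySem.Dict.mk (pvLookup rl).items = pvLookup rl := rfl
  rw [foldA_eq, hs0, foldB_items]
  have hc := fun st => sumB_eq_countP (pvLookup rl).items hnd (pvKeyCounts ev)
    (ev.map pvItemKey) (keyCounts_getD ev) st
  rw [hc "pending", hc "resolved", hc "ignored", hmk]
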